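-- pv_equiv track=rewrite | github.com/panameral/gestionePassword | Funzioni.py | intToPlat
-- ===== SOURCE A (Python) =====
-- def intToPlat(keys, index):
--     counter = index
--     counter_loop = 1
--     platform = ''
--
--     for i in keys:
--         if counter != counter_loop:
--             counter_loop += 1
--         else:
--             platform = i
--             break
--
--     return platform
-- ===== SOURCE B (Python) =====
-- def intToPlat(keys, index):
--     items = list(keys)
--     return items[index - 1] if 1 <= index <= len(items) else ''
-- ===== Notes on version B (the rewrite author's own statement) =====
-- stated objective: simpler
-- what changed: Replaces the counter-comparison loop (walking keys while incrementing a counter until it equals index) with a single bounds-checked positional lookup items[index-1].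
import Mathlib
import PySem

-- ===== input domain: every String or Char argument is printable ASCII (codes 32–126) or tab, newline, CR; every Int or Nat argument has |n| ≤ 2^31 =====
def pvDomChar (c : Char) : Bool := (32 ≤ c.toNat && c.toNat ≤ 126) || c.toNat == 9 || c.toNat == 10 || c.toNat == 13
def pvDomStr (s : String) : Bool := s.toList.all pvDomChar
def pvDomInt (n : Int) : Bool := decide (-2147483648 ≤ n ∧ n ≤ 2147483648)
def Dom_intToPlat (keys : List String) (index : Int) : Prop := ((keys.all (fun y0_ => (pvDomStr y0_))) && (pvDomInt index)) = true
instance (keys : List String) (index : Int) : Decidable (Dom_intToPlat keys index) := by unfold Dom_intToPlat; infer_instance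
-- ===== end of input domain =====

-- ===== PORT A =====
-- B replaces A's counter-comparison loop with one bounds-checked positional lookup (objective: simpler).
def intToPlatLoop : List String → Int → Int → String
  | [], _counter, _cl => ""
  | i :: rest, counter, counter_loop =>
      if counter ≠ counter_loop then intToPlatLoop rest counter (counter_loop + 1)
      else i

def intToPlat (keys : List String) (index : Int) : String :=
  intToPlatLoop keys index 1

-- ===== PORT B =====
def intToPlat_alt (keys : List String) (index : Int) : String :=
  if 1 ≤ index ∧ index ≤ (keys.length : Int) then
    (PySem.List.pyGet? keys (index - 1)).getD ""
  else ""

-- ===== PRECONDITION & SPEC =====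
def Spec_intToPlat (keys : List String) (index : Int) (out : String) : Prop := out = intToPlat_alt keys index
instance (keys : List String) (index : Int) (out : String) : Decidable (Spec_intToPlat keys index out) := by unfold Spec_intToPlat; infer_instance

-- ===== CLAIM (what is proved, stated in full; the proofs are below) =====
def Claim_equal_intToPlat : Prop := ∀ (keys : List String) (index : Int), Dom_intToPlat keys index → Spec_intToPlat keys index (intToPlat keys index)

-- ===== LEMMAS AND PROOFS =====

-- ===== VERDICT (by name: the statement is the Claim_ definition above) =====
theorem intToPlatLoop_eq (keys : List String) : ∀ (counter cl : Int),
    intToPlatLoop keys counter cl =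
      if cl ≤ counter ∧ counter < cl + (keys.length : Int) then
        (PySem.List.pyGet? keys (counter - cl)).getD ""
      else "" := by
  induction keys with
  | nil => intro counter cl; simp [intToPlatLoop]
  | cons i rest ih =>
      intro counter cl
      by_cases h : counter = cl
      · subst h
        simp [intToPlatLoop]
      · rw [show intToPlatLoop (i :: rest) counter cl
              = intToPlatLoop rest counter (cl + 1) by simp [intToPlatLoop, h]]
        rw [ih]
        by_cases hin : cl + 1 ≤ counter ∧ counter < cl + 1 + (rest.length : Int)
        · have h1 : cl ≤ counter ∧ counter < cl + ((i :: rest).length : Int) := by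
            simp; omega
          rw [if_pos hin, if_pos h1]
          have : counter - cl = (counter - (cl + 1)) + 1 := by omega
          rw [this]
          rw [PySem.List.pyGet?_of_nonneg rest (by omega),
              PySem.List.pyGet?_of_nonneg (i :: rest) (by omega)]
          have ht : (counter - (cl+1) + 1).toNat = (counter - (cl+1)).toNat + 1 := by omega
          rw [ht]
          simp
        · rw [if_neg hin, if_neg (by simp; omega)]

theorem intToPlat_spec : Claim_equal_intToPlat := by
  intro keys index _
  unfold Spec_intToPlat intToPlat intToPlat_alt
  rw [intToPlatLoop_eq]
  by_cases h : 1 ≤ index ∧ index ≤ (keys.length : Int)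
  · rw [if_pos h, if_pos (by omega)]
  · rw [if_neg h, if_neg (by omega)]
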